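-- pv_equiv track=rewrite | github.com/Sparrow375/Mental-Health-Detection-ML | MHealth - Copy/app/src/main/python/s1_profile.py | _get_feature_group
-- ===== SOURCE A (Python) =====
-- def _get_feature_group(feat: str) -> str:
--     """Return the group name for a feature."""
--     groups = {
--         "screen_app": ["screenTimeHours", "unlockCount", "appLaunchCount",
--                        "notificationsToday", "socialAppRatio"],
--         "communication": ["callsPerDay", "callDurationMinutes", "uniqueContacts",
--                           "conversationFrequency"],
--         "location": ["dailyDisplacementKm", "locationEntropy", "homeTimeRatio"],
--         "sleep": ["wakeTimeHour", "sleepTimeHour", "sleepDurationHours",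
--                   "darkDurationHours"],
--         "system": ["chargeDurationHours", "memoryUsagePercent", "networkWifiMB",
--                    "networkMobileMB", "storageUsedGB"],
--         "behavioral": ["totalAppsCount", "upiTransactionsToday", "appUninstallsToday",
--                        "appInstallsToday"],
--         "engagement": ["calendarEventsToday", "mediaCountToday", "downloadsToday",
--                        "musicTimeMinutes"],
--     }
--     for grp, feats in groups.items():
--         if feat in feats:
--             return grp
--     return "unknown"
-- ===== SOURCE B (Python) =====
-- # B: one inverted lookup table (feature -> group) with a direct .get, instead of scanning each group's list.
-- _FEATURE_TO_GROUP = {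
--     "screenTimeHours": "screen_app", "unlockCount": "screen_app",
--     "appLaunchCount": "screen_app", "notificationsToday": "screen_app",
--     "socialAppRatio": "screen_app",
--     "callsPerDay": "communication", "callDurationMinutes": "communication",
--     "uniqueContacts": "communication", "conversationFrequency": "communication",
--     "dailyDisplacementKm": "location", "locationEntropy": "location",
--     "homeTimeRatio": "location",
--     "wakeTimeHour": "sleep", "sleepTimeHour": "sleep",
--     "sleepDurationHours": "sleep", "darkDurationHours": "sleep",
--     "chargeDurationHours": "system", "memoryUsagePercent": "system",
--     "networkWifiMB": "system", "networkMobileMB": "system",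
--     "storageUsedGB": "system",
--     "totalAppsCount": "behavioral", "upiTransactionsToday": "behavioral",
--     "appUninstallsToday": "behavioral", "appInstallsToday": "behavioral",
--     "calendarEventsToday": "engagement", "mediaCountToday": "engagement",
--     "downloadsToday": "engagement", "musicTimeMinutes": "engagement",
-- }
--
-- def _get_feature_group(feat: str) -> str:
--     """Return the group name for a feature."""
--     return _FEATURE_TO_GROUP.get(feat, "unknown")
-- ===== Notes on version B (the rewrite author's own statement) =====
-- stated objective: idiomatic
-- what changed: Replaced the per-group scan with membership tests by a single precomputed inverted dict (feature -> group) queried with one .get(feat, 'unknown').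
import Mathlib
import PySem

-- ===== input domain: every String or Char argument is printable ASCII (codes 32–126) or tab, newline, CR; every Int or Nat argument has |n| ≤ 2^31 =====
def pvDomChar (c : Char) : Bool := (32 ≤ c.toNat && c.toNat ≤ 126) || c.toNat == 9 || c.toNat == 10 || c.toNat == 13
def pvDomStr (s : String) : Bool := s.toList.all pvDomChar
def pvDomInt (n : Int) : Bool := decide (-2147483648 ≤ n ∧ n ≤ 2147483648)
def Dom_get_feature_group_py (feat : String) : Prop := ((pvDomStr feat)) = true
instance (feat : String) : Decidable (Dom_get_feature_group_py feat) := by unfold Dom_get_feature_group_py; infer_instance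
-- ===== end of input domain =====

-- B replaces A's per-group scan with one precomputed inverted dict (feature -> group) and a single lookup; same values everywhere.

-- ===== PORT A =====
-- the groups dict of A, as an insertion-ordered association list
def pvGroupsA : List (String × List String) :=
  [("screen_app", ["screenTimeHours", "unlockCount", "appLaunchCount",
                   "notificationsToday", "socialAppRatio"]),
   ("communication", ["callsPerDay", "callDurationMinutes", "uniqueContacts",
                      "conversationFrequency"]),
   ("location", ["dailyDisplacementKm", "locationEntropy", "homeTimeRatio"]),
   ("sleep", ["wakeTimeHour", "sleepTimeHour", "sleepDurationHours",
              "darkDurationHours"]),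
   ("system", ["chargeDurationHours", "memoryUsagePercent", "networkWifiMB",
               "networkMobileMB", "storageUsedGB"]),
   ("behavioral", ["totalAppsCount", "upiTransactionsToday", "appUninstallsToday",
                   "appInstallsToday"]),
   ("engagement", ["calendarEventsToday", "mediaCountToday", "downloadsToday",
                   "musicTimeMinutes"])]

-- the 'for grp, feats in groups.items(): if feat in feats: return grp' loop with early return
def pvScanGroups (feat : String) : List (String × List String) → String
  | [] => "unknown"
  | (grp, feats) :: rest => if feats.contains feat then grp else pvScanGroups feat rest

def get_feature_group_py (feat : String) : String :=
  pvScanGroups feat pvGroupsA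

-- ===== PORT B =====
-- the module-level inverted dict literal of Source B
def pvFeatureToGroup : PySem.Dict String String :=
  PySem.Dict.ofList
    [("screenTimeHours", "screen_app"), ("unlockCount", "screen_app"),
     ("appLaunchCount", "screen_app"), ("notificationsToday", "screen_app"),
     ("socialAppRatio", "screen_app"),
     ("callsPerDay", "communication"), ("callDurationMinutes", "communication"),
     ("uniqueContacts", "communication"), ("conversationFrequency", "communication"),
     ("dailyDisplacementKm", "location"), ("locationEntropy", "location"),
     ("homeTimeRatio", "location"),
     ("wakeTimeHour", "sleep"), ("sleepTimeHour", "sleep"),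
     ("sleepDurationHours", "sleep"), ("darkDurationHours", "sleep"),
     ("chargeDurationHours", "system"), ("memoryUsagePercent", "system"),
     ("networkWifiMB", "system"), ("networkMobileMB", "system"),
     ("storageUsedGB", "system"),
     ("totalAppsCount", "behavioral"), ("upiTransactionsToday", "behavioral"),
     ("appUninstallsToday", "behavioral"), ("appInstallsToday", "behavioral"),
     ("calendarEventsToday", "engagement"), ("mediaCountToday", "engagement"),
     ("downloadsToday", "engagement"), ("musicTimeMinutes", "engagement")]

def get_feature_group_py_alt (feat : String) : String :=
  pvFeatureToGroup.getD feat "unknown"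

-- ===== PRECONDITION & SPEC =====
def Spec_get_feature_group_py (feat : String) (out : String) : Prop := out = get_feature_group_py_alt feat
instance (feat : String) (out : String) : Decidable (Spec_get_feature_group_py feat out) := by unfold Spec_get_feature_group_py; infer_instance

-- ===== CLAIM (what is proved, stated in full; the proofs are below) =====
def Claim_equal_get_feature_group_py : Prop := ∀ (feat : String), Dom_get_feature_group_py feat → Spec_get_feature_group_py feat (get_feature_group_py feat)

-- ===== LEMMAS AND PROOFS =====
-- the literal inverted dict, normalized to its items list (all keys distinct)
set_option maxHeartbeats 2000000 in
theorem pvFTG_items : pvFeatureToGroup = PySem.Dict.mk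
    [("screenTimeHours", "screen_app"), ("unlockCount", "screen_app"),
     ("appLaunchCount", "screen_app"), ("notificationsToday", "screen_app"),
     ("socialAppRatio", "screen_app"),
     ("callsPerDay", "communication"), ("callDurationMinutes", "communication"),
     ("uniqueContacts", "communication"), ("conversationFrequency", "communication"),
     ("dailyDisplacementKm", "location"), ("locationEntropy", "location"),
     ("homeTimeRatio", "location"),
     ("wakeTimeHour", "sleep"), ("sleepTimeHour", "sleep"),
     ("sleepDurationHours", "sleep"), ("darkDurationHours", "sleep"),
     ("chargeDurationHours", "system"), ("memoryUsagePercent", "system"),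
     ("networkWifiMB", "system"), ("networkMobileMB", "system"),
     ("storageUsedGB", "system"),
     ("totalAppsCount", "behavioral"), ("upiTransactionsToday", "behavioral"),
     ("appUninstallsToday", "behavioral"), ("appInstallsToday", "behavioral"),
     ("calendarEventsToday", "engagement"), ("mediaCountToday", "engagement"),
     ("downloadsToday", "engagement"), ("musicTimeMinutes", "engagement")] := by decide

-- A's scan returns "unknown" when feat occurs in no group's feature list
theorem pvScan_unknown (feat : String) (l : List (String × List String))
    (h : ∀ p ∈ l, feat ∉ p.2) : pvScanGroups feat l = "unknown" := by
  induction l with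
  | nil => rfl
  | cons p rest ih =>
    obtain ⟨grp, feats⟩ := p
    have hf : feats.contains feat = false := by
      simpa using h (grp, feats) (List.mem_cons_self ..)
    simp only [pvScanGroups, hf, Bool.false_eq_true, if_false]
    exact ih (fun q hq => h q (List.mem_cons_of_mem _ hq))

-- ===== VERDICT (by name: the statement is the Claim_ definition above) =====
set_option maxHeartbeats 2000000 in
theorem get_feature_group_py_spec : Claim_equal_get_feature_group_py := by
  intro feat _
  unfold Spec_get_feature_group_py get_feature_group_py get_feature_group_py_alt
  rw [pvFTG_items, PySem.Dict.getD_eq_get?_getD]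
  by_cases hmem : feat ∈ ["screenTimeHours","unlockCount","appLaunchCount","notificationsToday","socialAppRatio","callsPerDay","callDurationMinutes","uniqueContacts","conversationFrequency","dailyDisplacementKm","locationEntropy","homeTimeRatio","wakeTimeHour","sleepTimeHour","sleepDurationHours","darkDurationHours","chargeDurationHours","memoryUsagePercent","networkWifiMB","networkMobileMB","storageUsedGB","totalAppsCount","upiTransactionsToday","appUninstallsToday","appInstallsToday","calendarEventsToday","mediaCountToday","downloadsToday","musicTimeMinutes"]
  · fin_cases hmem <;> rfl
  · have hA : pvScanGroups feat pvGroupsA = "unknown" := by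
      apply pvScan_unknown
      intro p hp
      fin_cases hp <;> simp_all
    have hB : (PySem.Dict.mk
    [("screenTimeHours", "screen_app"), ("unlockCount", "screen_app"),
     ("appLaunchCount", "screen_app"), ("notificationsToday", "screen_app"),
     ("socialAppRatio", "screen_app"),
     ("callsPerDay", "communication"), ("callDurationMinutes", "communication"),
     ("uniqueContacts", "communication"), ("conversationFrequency", "communication"),
     ("dailyDisplacementKm", "location"), ("locationEntropy", "location"),
     ("homeTimeRatio", "location"),
     ("wakeTimeHour", "sleep"), ("sleepTimeHour", "sleep"),
     ("sleepDurationHours", "sleep"), ("darkDurationHours", "sleep"),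
     ("chargeDurationHours", "system"), ("memoryUsagePercent", "system"),
     ("networkWifiMB", "system"), ("networkMobileMB", "system"),
     ("storageUsedGB", "system"),
     ("totalAppsCount", "behavioral"), ("upiTransactionsToday", "behavioral"),
     ("appUninstallsToday", "behavioral"), ("appInstallsToday", "behavioral"),
     ("calendarEventsToday", "engagement"), ("mediaCountToday", "engagement"),
     ("downloadsToday", "engagement"), ("musicTimeMinutes", "engagement")]).get? feat = none := by
      rw [PySem.Dict.get?_eq_none_iff_not_mem_keys]
      simpa [PySem.Dict.keys_mk] using hmem
    rw [hA, hB]; rfl
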